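-- pv_equiv track=rewrite | github.com/TeddyGavi/Python-playground | lotide/letter_positions.py | letter_positions
-- ===== SOURCE A (Python) =====
-- def letter_positions(string):
--     result = {}
--     for i in range(0, len(string)):
--         if string[i] == ' ':
--             continue
--         elif string[i] in result:
--             result[string[i]].append(i)
--         else:
--             result[string[i]] = [i]
--     return result
-- ===== SOURCE B (Python) =====
-- def letter_positions(string):
--     return {c: [i for i, ch in enumerate(string) if ch == c]
--             for c in dict.fromkeys(string) if c != ' '}
-- ===== Notes on version B (the rewrite author's own statement) =====
-- stated objective: idiomatic
-- what changed: A's single incremental pass that grows per-key lists in a dict is replaced by a dict comprehension over the distinct non-space characters (dict.fromkeys for first-appearance order) that rescans the whole enumerated string once per distinct character.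
import Mathlib
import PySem

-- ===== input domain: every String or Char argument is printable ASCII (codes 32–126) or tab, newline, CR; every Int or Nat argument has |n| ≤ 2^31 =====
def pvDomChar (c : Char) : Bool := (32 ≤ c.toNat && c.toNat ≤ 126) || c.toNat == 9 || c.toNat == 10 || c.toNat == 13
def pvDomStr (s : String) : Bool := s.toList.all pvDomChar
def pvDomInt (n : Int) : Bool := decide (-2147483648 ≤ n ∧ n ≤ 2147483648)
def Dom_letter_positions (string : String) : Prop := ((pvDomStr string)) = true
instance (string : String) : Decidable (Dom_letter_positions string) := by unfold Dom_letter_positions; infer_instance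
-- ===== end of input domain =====

-- B replaces A's single incremental grouping pass with an outer loop over the distinct
-- non-space characters and a full rescan of the string per character (idiomatic dict
-- comprehension); same return value.

-- ===== PORT A =====
-- A's loop body: skip spaces; if the (1-char string) key is present, append i, else start [i].
def pvStepA (d : PySem.Dict String (List Int)) (p : Int × Char) : PySem.Dict String (List Int) :=
  if p.2 = ' ' then d
  else
    match d.get? (String.ofList [p.2]) with
    | some l => d.insert (String.ofList [p.2]) (l ++ [p.1])
    | none   => d.insert (String.ofList [p.2]) [p.1]

def letter_positions (string : String) : List (String × List Int) :=
  ((PySem.List.enumerate string.toList 0).foldl pvStepA PySem.Dict.empty).items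

-- ===== PORT B =====
-- dict.fromkeys(string) = PySem.List.dedup; one position list per distinct non-space char,
-- each built by rescanning the whole enumerated string.
def letter_positions_alt (string : String) : List (String × List Int) :=
  ((PySem.List.dedup string.toList).filter (fun c => ¬(c = ' '))).map
    (fun c => (String.ofList [c],
      ((PySem.List.enumerate string.toList 0).filter (fun p => p.2 = c)).map (fun p => p.1)))

-- ===== PRECONDITION & SPEC =====
def Spec_letter_positions (string : String) (out : List (String × List Int)) : Prop := out = letter_positions_alt string
instance (string : String) (out : List (String × List Int)) : Decidable (Spec_letter_positions string out) := by unfold Spec_letter_positions; infer_instance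

-- ===== CLAIM (what is proved, stated in full; the proofs are below) =====
def Claim_equal_letter_positions : Prop := ∀ (string : String), Dom_letter_positions string → Spec_letter_positions string (letter_positions string)

-- ===== LEMMAS AND PROOFS =====

theorem pvMkInj {a b : Char} : String.ofList [a] = String.ofList [b] ↔ a = b := by
  constructor
  · intro h; simpa using congrArg String.toList h
  · intro h; rw [h]

-- A's step is a `modify` with default [] (and a skip on spaces).
theorem pvStepA_eq_modify (d : PySem.Dict String (List Int)) (p : Int × Char) :
    pvStepA d p = if p.2 = ' ' then d
      else d.modify (String.ofList [p.2]) [] (fun l => l ++ [p.1]) := by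
  unfold pvStepA
  split
  · rfl
  · rcases h : d.get? (String.ofList [p.2]) with _ | l <;>
      simp [PySem.Dict.modify, PySem.Dict.getD_eq_get?_getD, h]

-- a fold whose step skips some elements = the fold over the filtered list
theorem pvFoldl_skip {α β : Type} (P : β → Prop) [DecidablePred P]
    (g : α → β → α) (l : List β) (init : α) :
    l.foldl (fun a x => if P x then a else g a x) init
      = (l.filter (fun x => ¬ P x)).foldl g init := by
  induction l generalizing init with
  | nil => rfl
  | cons x xs ih =>
    by_cases h : P x <;> simp [h, ih]

-- dedup commutes with an injective map
theorem pvDedup_map {α β : Type} [DecidableEq α] [DecidableEq β]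
    (f : α → β) (hf : Function.Injective f) (xs : List α) :
    PySem.List.dedup (xs.map f) = (PySem.List.dedup xs).map f := by
  induction xs using List.reverseRecOn with
  | nil => rfl
  | append_singleton xs x ih =>
    simp only [List.map_append, List.map_cons, List.map_nil,
      PySem.List.dedup_eq_ofList] at *
    rw [PySem.Set.ofList_append_singleton, PySem.Set.ofList_append_singleton, ih,
      PySem.Set.add, PySem.Set.add]
    by_cases hx : x ∈ PySem.List.dedup xs <;>
      simp_all

-- dedup commutes with filter
theorem pvDedup_filter {α : Type} [DecidableEq α]
    (q : α → Bool) (xs : List α) :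
    PySem.List.dedup (xs.filter q) = (PySem.List.dedup xs).filter q := by
  induction xs using List.reverseRecOn with
  | nil => rfl
  | append_singleton xs x ih =>
    simp only [List.filter_append, PySem.List.dedup_eq_ofList] at *
    by_cases hq : q x
    · rw [show List.filter q [x] = [x] by simp [hq],
        PySem.Set.ofList_append_singleton, PySem.Set.ofList_append_singleton, ih,
        PySem.Set.add, PySem.Set.add]
      by_cases hx : x ∈ xs <;>
        simp_all [List.mem_filter, List.filter_append]
    · rw [show List.filter q [x] = [] by simp [hq],
        List.append_nil, ih, PySem.Set.ofList_append_singleton, PySem.Set.add]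
      by_cases hx : x ∈ xs <;>
        simp [PySem.Set.mem_ofList, hx, List.filter_append, hq]

theorem pvMain (s : String) : letter_positions s = letter_positions_alt s := by
  unfold letter_positions letter_positions_alt
  have hstep : pvStepA = fun d p => if p.2 = ' ' then d
      else d.modify (String.ofList [p.2]) [] (fun l => l ++ [p.1]) :=
    funext fun d => funext fun p => pvStepA_eq_modify d p
  rw [hstep, pvFoldl_skip (fun p : Int × Char => p.2 = ' ')]
  set cs := s.toList with hcs
  set l := PySem.List.enumerate cs 0 with hl
  set lf := l.filter (fun p => ¬ p.2 = ' ') with hlf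
  set d := lf.foldl (fun d p => d.modify (String.ofList [p.2]) [] (fun l => l ++ [p.1]))
      PySem.Dict.empty with hd
  have hnd : d.keys.Nodup := by
    rw [hd]
    exact PySem.Dict.nodup_keys_foldl_modify_key _ _ _ _ _ PySem.Dict.nodup_keys_empty
  have hkeymap : lf.map (fun p => String.ofList [p.2])
      = (cs.filter (fun c => ¬ c = ' ')).map (fun c => String.ofList [c]) := by
    have h2 : lf.map (fun p : Int × Char => p.2) = cs.filter (fun c => ¬ c = ' ') := by
      rw [hlf]
      rw [← PySem.List.map_snd_enumerate cs 0, ← hl, List.filter_map]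
      rfl
    calc lf.map (fun p => String.ofList [p.2])
        = (lf.map (fun p : Int × Char => p.2)).map (fun c => String.ofList [c]) := by
          rw [List.map_map]; rfl
      _ = _ := by rw [h2]
  have hkeys : d.keys = ((PySem.List.dedup cs).filter (fun c => ¬ c = ' ')).map
      (fun c => String.ofList [c]) := by
    rw [hd, PySem.Dict.keys_foldl_modify_key, PySem.Dict.keys_empty,
      PySem.Set.update_nil_left, hkeymap]
    rw [← PySem.List.dedup_eq_ofList,
      pvDedup_map (fun c => String.ofList [c]) (fun a b h => pvMkInj.mp h),
      pvDedup_filter]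
  rw [PySem.Dict.items_eq_map_keys d hnd [], hkeys, List.map_map]
  apply List.map_congr_left
  intro c hcmem
  have hc : ¬ c = ' ' := by
    have := List.of_mem_filter hcmem
    simpa using this
  simp only [Function.comp, Prod.mk.injEq, true_and]
  -- value at key String.ofList [c]
  have hval : d.getD (String.ofList [c]) []
      = (lf.filter (fun p => p.2 = c)).map (fun p => p.1) := by
    rw [hd, ← List.foldl_map (f := fun p : Int × Char => (String.ofList [p.2], p.1))
      (g := fun d (q : String × Int) => PySem.Dict.modify d q.1 [] (fun l => l ++ [q.2]))]
    rw [PySem.Dict.getD_foldl_modify_append, PySem.Dict.getD_empty, List.nil_append,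
      List.filter_map]
    have hfeq : ((fun q : String × Int => q.1 == String.ofList [c]) ∘
        (fun p : Int × Char => (String.ofList [p.2], p.1)))
        = fun p : Int × Char => decide (p.2 = c) := by
      funext p
      by_cases h : p.2 = c <;> simp [Function.comp, pvMkInj, h]
    rw [hfeq, List.map_map]
    rfl
  rw [hval, hlf, List.filter_filter]
  congr 1
  apply List.filter_congr
  intro p _
  by_cases hpc : p.2 = c <;> simp [hpc, hc]

-- ===== VERDICT (by name: the statement is the Claim_ definition above) =====
theorem letter_positions_spec : Claim_equal_letter_positions := by
  intro s _
  exact pvMain s
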